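-- pv_equiv track=rewrite | github.com/yongwonkim1/Baekjoon-python | 24267.py | MenOfPassion
-- ===== SOURCE A (Python) =====
-- def MenOfPassion(n):
--     A = list(range(n))
--     sum = 0
--     count = 0
--     for i in range(1, n - 1):
--         for j in range(i + 1, n):
--             for k in range(j + 1, n + 1):
--                 count+=1
--                 sum += A[i-1] * A[j-1] * A[k-1]
--     return count
-- ===== SOURCE B (Python) =====
-- def MenOfPassion(n):
--     # closed form: the loop counts C(n, 3) triples
--     return n * (n - 1) * (n - 2) // 6 if n >= 3 else 0
-- ===== Notes on version B (the rewrite author's own statement) =====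
-- stated objective: faster
-- what changed: replaces the triple nested loop (which only counts iterations) by the closed-form binomial coefficient n*(n-1)*(n-2)//6
import Mathlib
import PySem

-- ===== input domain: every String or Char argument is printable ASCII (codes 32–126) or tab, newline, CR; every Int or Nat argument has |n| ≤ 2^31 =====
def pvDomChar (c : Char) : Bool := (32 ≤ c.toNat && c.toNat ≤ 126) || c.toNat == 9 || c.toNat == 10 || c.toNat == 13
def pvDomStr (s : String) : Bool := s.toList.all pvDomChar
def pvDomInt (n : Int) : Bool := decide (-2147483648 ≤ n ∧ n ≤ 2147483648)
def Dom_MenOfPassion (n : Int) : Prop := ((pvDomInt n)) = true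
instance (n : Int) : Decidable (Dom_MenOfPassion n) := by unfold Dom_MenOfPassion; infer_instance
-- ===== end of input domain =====

-- B replaces A's O(n^3) triple loop (which only counts its iterations) by the closed form C(n,3) = n(n-1)(n-2)//6.

-- ===== PORT A =====
-- state is (sum, count) exactly as in the Python. Python's 'A = list(range(n))' and 'A[x]'
-- (O(1) indexing) are ported by hand as an Array of the same elements with pvIdx: exact for
-- 0 <= x < n, which holds for every index i-1, j-1, k-1 these loops produce.
def pvIdx (A : Array Int) (x : Int) : Int :=
  if h : 0 ≤ x ∧ x.toNat < A.size then A[x.toNat]'h.2 else 0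

def MenOfPassion (n : Int) : Int :=
  let A := (PySem.List.pyRange 0 n 1).toArray
  let r := (PySem.List.pyRange 1 (n - 1) 1).foldl (fun (p : Int × Int) i =>
    (PySem.List.pyRange (i + 1) n 1).foldl (fun (p : Int × Int) j =>
      (PySem.List.pyRange (j + 1) (n + 1) 1).foldl (fun (p : Int × Int) k =>
        (p.1 + pvIdx A (i - 1) * pvIdx A (j - 1) * pvIdx A (k - 1),
         p.2 + 1)) p) p) ((0 : Int), (0 : Int))
  r.2

-- ===== PORT B =====
def MenOfPassion_alt (n : Int) : Int :=
  if 3 ≤ n then PySem.Int.floordiv (n * (n - 1) * (n - 2)) 6 else 0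

-- ===== PRECONDITION & SPEC =====
def Spec_MenOfPassion (n : Int) (out : Int) : Prop := out = MenOfPassion_alt n
instance (n : Int) (out : Int) : Decidable (Spec_MenOfPassion n out) := by unfold Spec_MenOfPassion; infer_instance

-- ===== CLAIM (what is proved, stated in full; the proofs are below) =====
def Claim_equal_MenOfPassion : Prop := ∀ (n : Int), Dom_MenOfPassion n → Spec_MenOfPassion n (MenOfPassion n)

-- ===== LEMMAS AND PROOFS =====

-- second component of a fold whose second component gains g x at every step
theorem pv_snd_foldl_add (F : Int × Int → Int → Int × Int) (g : Int → Int)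
    (h : ∀ p x, (F p x).2 = p.2 + g x) :
    ∀ (l : List Int) (p : Int × Int), (l.foldl F p).2 = p.2 + (l.map g).sum := by
  intro l
  induction l with
  | nil => intro p; simp
  | cons x xs ih =>
      intro p
      simp only [List.foldl_cons, List.map_cons, List.sum_cons, ih, h]
      ring

-- the number of iterations of the two inner loops, as Int-valued sums over the ranges
def pvS2 (n a : Int) : Int :=
  ((PySem.List.pyRange a n 1).map (fun j => (((n - j).toNat : Int)))).sum

def pvS3 (n a : Int) : Int :=
  ((PySem.List.pyRange a (n - 1) 1).map (fun i => pvS2 n (i + 1))).sum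

theorem pvS2_closed (n : Int) : ∀ (k : Nat) (a : Int), a = n - k →
    2 * pvS2 n a = (k : Int) * ((k : Int) + 1) := by
  intro k
  induction k with
  | zero =>
      intro a ha
      simp at ha
      subst ha
      simp [pvS2, PySem.List.pyRange_one_eq_nil le_rfl]
  | succ m ih =>
      intro a ha
      have hlt : a < n := by omega
      have hrec := ih (a + 1) (by omega)
      simp only [pvS2, PySem.List.pyRange_one_cons hlt, List.map_cons, List.sum_cons] at *
      have hterm : ((n - a).toNat : Int) = (m : Int) + 1 := by omega
      rw [hterm]
      push_cast
      ring_nf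
      ring_nf at hrec
      omega

theorem pvS3_closed (n : Int) : ∀ (k : Nat) (a : Int), a = n - 1 - k →
    6 * pvS3 n a = (k : Int) * ((k : Int) + 1) * ((k : Int) + 2) := by
  intro k
  induction k with
  | zero =>
      intro a ha
      simp at ha
      subst ha
      simp [pvS3, PySem.List.pyRange_one_eq_nil le_rfl]
  | succ m ih =>
      intro a ha
      have hlt : a < n - 1 := by omega
      have hrec := ih (a + 1) (by omega)
      have h2 := pvS2_closed n (m + 1) (a + 1) (by push_cast; omega)
      simp only [pvS3, PySem.List.pyRange_one_cons hlt, List.map_cons, List.sum_cons] at *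
      push_cast at h2 ⊢
      nlinarith [h2, hrec]

-- the count returned by A equals pvS3 n 1
theorem pv_count_eq (n : Int) : MenOfPassion n = pvS3 n 1 := by
  unfold MenOfPassion
  rw [pv_snd_foldl_add _ (fun i => pvS2 n (i + 1))]
  · simp [pvS3]
  · intro p i
    rw [pv_snd_foldl_add _ (fun j => ((n - j).toNat : Int))]
    · simp [pvS2]
    · intro q j
      rw [pv_snd_foldl_add _ (fun _ => (1 : Int))]
      · simp [PySem.List.length_pyRange_one]
      · intro r k
        simp

-- ===== VERDICT (by name: the statement is the Claim_ definition above) =====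
theorem MenOfPassion_spec : Claim_equal_MenOfPassion := by
  intro n _
  unfold Spec_MenOfPassion MenOfPassion_alt
  rw [pv_count_eq]
  by_cases h3 : 3 ≤ n
  · simp only [h3, if_true]
    have h := pvS3_closed n (n - 2).toNat 1 (by omega)
    have hk : ((n - 2).toNat : Int) = n - 2 := by omega
    rw [hk] at h
    have hprod : n * (n - 1) * (n - 2) = 6 * pvS3 n 1 := by linarith [h, sq_nonneg n]
    rw [hprod, PySem.Int.floordiv_eq_ediv_of_pos (by norm_num)]
    exact (Int.mul_ediv_cancel_left _ (by norm_num)).symm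
  · simp only [h3, if_false]
    have hnil : PySem.List.pyRange 1 (n - 1) 1 = [] :=
      PySem.List.pyRange_one_eq_nil (by omega)
    simp [pvS3, hnil]
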